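-- pv_equiv track=rewrite | github.com/mandy331/Data-Structure-Algorithm | HW6/Dijkstra_05170209.py | find_min_vertice
-- ===== SOURCE A (Python) =====
-- def find_min_vertice(visited_array ,graph_matrix):
--     not_visited_val = []
--     for i in range(len(graph_matrix)):
--         if graph_matrix[i] > 0 and i not in visited_array:
--             not_visited_val.append(graph_matrix[i])
--     min_val = min(not_visited_val)
--     for i in range(len(graph_matrix)):
--         if i not in visited_array and graph_matrix[i] == min_val:
--             return i
-- ===== SOURCE B (Python) =====
-- def find_min_vertice(visited_array, graph_matrix):
--     best = None  # (index, distance) of best candidate so far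
--     for i, d in enumerate(graph_matrix):
--         if d > 0 and i not in visited_array and (best is None or d < best[1]):
--             best = (i, d)
--     if best is None:
--         raise ValueError("no unvisited vertex with positive distance")
--     return best[0]
-- ===== Notes on version B (the rewrite author's own statement) =====
-- stated objective: simpler
-- what changed: A builds a list of candidate values, takes min, then rescans for the first index with that value; B is a single running-argmin pass keeping the best (index, value) pair.
import Mathlib
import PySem

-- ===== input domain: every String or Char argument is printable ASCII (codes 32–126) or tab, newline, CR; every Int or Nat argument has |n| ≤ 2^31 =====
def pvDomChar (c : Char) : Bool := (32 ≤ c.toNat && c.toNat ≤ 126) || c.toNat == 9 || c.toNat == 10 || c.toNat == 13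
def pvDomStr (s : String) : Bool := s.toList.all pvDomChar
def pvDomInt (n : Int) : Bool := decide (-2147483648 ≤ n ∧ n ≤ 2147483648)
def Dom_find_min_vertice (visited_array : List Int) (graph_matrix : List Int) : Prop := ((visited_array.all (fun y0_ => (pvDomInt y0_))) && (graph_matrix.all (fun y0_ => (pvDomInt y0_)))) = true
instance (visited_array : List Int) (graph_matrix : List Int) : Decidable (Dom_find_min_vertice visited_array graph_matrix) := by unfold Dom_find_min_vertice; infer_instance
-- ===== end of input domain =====

-- B replaces A's three-step structure (collect candidate values, min, rescan for its first
-- index) with a single running-argmin pass; simpler, same asymptotic cost.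


-- ===== PORT A =====
def find_min_vertice (visited_array : List Int) (graph_matrix : List Int) : Option Int :=
  -- first loop: collect the positive, unvisited distances
  let not_visited_val := (PySem.List.pyRange 0 graph_matrix.length 1).foldl
    (fun acc i =>
      if (decide (0 < PySem.List.pyGetD graph_matrix i 0) && !(visited_array.contains i)) = true
      then acc ++ [PySem.List.pyGetD graph_matrix i 0] else acc) []
  -- min(not_visited_val): none = ValueError, excluded by Pre_
  match PySem.List.min? not_visited_val (fun x => x) with
  | none => none
  | some min_val =>
    -- second loop: return the first i with i unvisited and graph_matrix[i] == min_val
    (PySem.List.pyRange 0 graph_matrix.length 1).find?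
      (fun i => !(visited_array.contains i) && decide (PySem.List.pyGetD graph_matrix i 0 = min_val))

-- ===== PORT B =====
def find_min_vertice_alt (visited_array : List Int) (graph_matrix : List Int) : Option Int :=
  -- single pass keeping best = (index, distance) of the best candidate so far
  let best := (PySem.List.enumerate graph_matrix).foldl
    (fun best p =>
      if (decide (0 < p.2) && !(visited_array.contains p.1) &&
          (match best with | none => true | some q => decide (p.2 < q.2))) = true
      then some p else best)
    none
  -- best = None in Source B means ValueError, excluded by Pre_
  best.map Prod.fst

-- ===== PRECONDITION & SPEC =====
-- Pre_ excludes exactly the inputs with no positive-distance unvisited index, on which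
-- Python A (min of an empty list) and Python B both raise ValueError.
def Pre_find_min_vertice (visited_array : List Int) (graph_matrix : List Int) : Prop :=
  ∃ p ∈ PySem.List.enumerate graph_matrix, 0 < p.2 ∧ p.1 ∉ visited_array
instance (visited_array : List Int) (graph_matrix : List Int) : Decidable (Pre_find_min_vertice visited_array graph_matrix) := by unfold Pre_find_min_vertice; infer_instance

def pvWitness_find_min_vertice : List Int × List Int := ([1], [3, 2, 2])

def Spec_find_min_vertice (visited_array : List Int) (graph_matrix : List Int) (out : Option Int) : Prop := out = find_min_vertice_alt visited_array graph_matrix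
instance (visited_array : List Int) (graph_matrix : List Int) (out : Option Int) : Decidable (Spec_find_min_vertice visited_array graph_matrix out) := by unfold Spec_find_min_vertice; infer_instance

-- ===== CLAIM (what is proved, stated in full; the proofs are below) =====
def Claim_equal_find_min_vertice : Prop := ∀ (visited_array : List Int) (graph_matrix : List Int), Dom_find_min_vertice visited_array graph_matrix → Pre_find_min_vertice visited_array graph_matrix → Spec_find_min_vertice visited_array graph_matrix (find_min_vertice visited_array graph_matrix)

-- ===== LEMMAS AND PROOFS =====

-- running argmin on a nonempty list, with the first element as initial best
def pvF : Int × Int → List (Int × Int) → Int × Int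
  | b, [] => b
  | b, p :: t => pvF (if p.2 < b.2 then p else b) t

theorem pv_find?_congr_mem {α : Type} (P Q : α → Bool) :
    ∀ (l : List α), (∀ a ∈ l, P a = Q a) → l.find? P = l.find? Q := by
  intro l
  induction l with
  | nil => intro _; rfl
  | cons x t ih =>
    intro h
    have hx := h x (List.mem_cons_self)
    by_cases hPx : P x = true
    · simp [List.find?, hPx, hx ▸ hPx]
    · have : Q x ≠ true := by rw [← hx]; exact hPx
      simp [List.find?, hPx, this]
      exact ih (fun a ha => h a (List.mem_cons_of_mem _ ha))

theorem pv_find?_filter_of_imp {α : Type} (P c : α → Bool)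
    (himp : ∀ a, P a = true → c a = true) :
    ∀ (l : List α), l.find? P = (l.filter c).find? P := by
  intro l
  induction l with
  | nil => rfl
  | cons x t ih =>
    by_cases hPx : P x = true
    · simp [List.find?, hPx, himp x hPx]
    · by_cases hcx : c x = true
      · simp [List.find?, hPx, hcx, ih]
      · simp [List.find?, hPx, hcx, ih]

-- B's pure argmin step (the inner part of B's loop body, after the candidate test)
def pvStep (best : Option (Int × Int)) (p : Int × Int) : Option (Int × Int) :=
  if (match best with | none => true | some q => decide (p.2 < q.2)) = true
  then some p else best

-- the foldl of B's filtered step, started at some b, is pvF b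
theorem pv_foldl_core (t : List (Int × Int)) : ∀ (b : Int × Int),
    t.foldl pvStep (some b) = some (pvF b t) := by
  induction t with
  | nil => intro b; rfl
  | cons p t ih =>
    intro b
    by_cases h : p.2 < b.2 <;> simp [pvStep, pvF, h, ih]

theorem pv_foldl_none (q : Int × Int) (t : List (Int × Int)) :
    (q :: t).foldl pvStep none = some (pvF q t) := by
  show t.foldl pvStep (pvStep none q) = some (pvF q t)
  have h : pvStep none q = some q := rfl
  rw [h, pv_foldl_core]

-- the first element of a nonempty pair list whose snd equals the min of the snds is the running argmin
theorem pv_F_find : ∀ (qs : List (Int × Int)) (q : Int × Int),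
    (q :: qs).find? (fun p => decide (p.2 = List.foldl min q.2 (qs.map Prod.snd)))
      = some (pvF q qs) := by
  intro qs
  induction qs with
  | nil => intro q; simp [List.find?, pvF]
  | cons a qs' ih =>
    intro q
    have hmin : PySem.List.min? (q.2 :: a.2 :: qs'.map Prod.snd) (fun y => y)
        = some (List.foldl min q.2 ((a :: qs').map Prod.snd)) := by
      simpa using PySem.List.min?_id_cons q.2 ((a :: qs').map Prod.snd)
    set M := List.foldl min q.2 ((a :: qs').map Prod.snd) with hM
    have hle := PySem.List.min?_isMin hmin
    have hMq : M ≤ q.2 := hle q.2 (by simp)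
    have hMa : M ≤ a.2 := hle a.2 (by simp)
    have hM' : List.foldl min (if a.2 < q.2 then a else q).2 (qs'.map Prod.snd) = M := by
      by_cases h : a.2 < q.2
      · simp only [hM, List.map_cons, List.foldl_cons]
        rw [if_pos h, min_eq_right (le_of_lt h)]
      · simp only [hM, List.map_cons, List.foldl_cons]
        rw [if_neg h, min_eq_left (le_of_not_gt h)]
    have ihq := ih (if a.2 < q.2 then a else q)
    rw [hM'] at ihq
    have hpvcons : pvF q (a :: qs') = pvF (if a.2 < q.2 then a else q) qs' := rfl
    by_cases h : a.2 < q.2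
    · have hqne : ¬ (q.2 = M) := by omega
      rw [if_pos h] at ihq
      rw [hpvcons, if_pos h]
      calc (q :: a :: qs').find? (fun p => decide (p.2 = M))
          = (a :: qs').find? (fun p => decide (p.2 = M)) := by
            simp [List.find?, hqne]
        _ = some (pvF a qs') := ihq
    · rw [if_neg h] at ihq
      rw [hpvcons, if_neg h]
      by_cases hq : q.2 = M
      · have hfq : (q :: qs').find? (fun p => decide (p.2 = M)) = some q := by
          simp [List.find?, hq]
        rw [hfq] at ihq
        have hpv : pvF q qs' = q := (Option.some.inj ihq.symm)
        calc (q :: a :: qs').find? (fun p => decide (p.2 = M))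
            = some q := by simp [List.find?, hq]
          _ = some (pvF q qs') := by rw [hpv]
      · have hane : ¬ (a.2 = M) := by
          have : M < q.2 := lt_of_le_of_ne hMq (fun hh => hq hh.symm)
          omega
        have hfq2 : (q :: qs').find? (fun p => decide (p.2 = M))
            = qs'.find? (fun p => decide (p.2 = M)) := by simp [List.find?, hq]
        rw [hfq2] at ihq
        calc (q :: a :: qs').find? (fun p => decide (p.2 = M))
            = qs'.find? (fun p => decide (p.2 = M)) := by simp [List.find?, hq, hane]
          _ = some (pvF q qs') := ihq

theorem find_min_vertice_eq (visited_array graph_matrix : List Int)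
    (hpre : Pre_find_min_vertice visited_array graph_matrix) :
    find_min_vertice visited_array graph_matrix
      = find_min_vertice_alt visited_array graph_matrix := by
  -- notation
  set v := visited_array
  set g := graph_matrix
  have henum : PySem.List.enumerate g
      = (PySem.List.pyRange 0 g.length 1).map (fun j => (j, PySem.List.pyGetD g j 0)) := by
    simpa [PySem.List.len] using PySem.List.enumerate_eq_map_pyRange g 0
  set r := PySem.List.pyRange 0 g.length 1 with hr
  set getD : Int → Int := fun i => PySem.List.pyGetD g i 0 with hgetD
  set c : Int → Bool := fun i => decide (0 < getD i) && !(v.contains i) with hc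
  set f : Int → Int × Int := fun i => (i, getD i) with hf
  set rc := r.filter c with hrc
  set ps := rc.map f with hps
  -- B's step splits into a candidate filter and the pure argmin step
  have hsplit : (fun (best : Option (Int × Int)) (p : Int × Int) =>
      if (decide (0 < p.2) && !(v.contains p.1) &&
          (match best with | none => true | some q => decide (p.2 < q.2))) = true
      then some p else best)
      = (fun best p =>
        if (decide (0 < p.2) && !(v.contains p.1)) = true then pvStep best p
        else best) := by
    funext best p
    by_cases h1 : (decide (0 < p.2) && !(v.contains p.1)) = true <;>
      by_cases h2 : (match best with | none => true | some q => decide (p.2 < q.2)) = true <;>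
        simp [pvStep, h2]
  -- B's fold over enumerate = argmin fold over the candidate pair list ps
  have hfilter_map : (PySem.List.enumerate g).filter (fun p => decide (0 < p.2) && !(v.contains p.1)) = ps := by
    rw [henum, List.filter_map]
    rfl
  have hB : find_min_vertice_alt v g
      = (ps.foldl pvStep none).map Prod.fst := by
    show ((PySem.List.enumerate g).foldl _ none).map Prod.fst = _
    rw [hsplit, PySem.List.foldl_if_eq_foldl_filter, hfilter_map]
  -- ps is nonempty
  have hne : ps ≠ [] := by
    obtain ⟨p, hpmem, hpos, hnc⟩ := hpre
    intro hnil
    have : p ∈ (PySem.List.enumerate g).filter (fun p => decide (0 < p.2) && !(v.contains p.1)) := by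
      refine List.mem_filter.mpr ⟨hpmem, ?_⟩
      simp [hpos, hnc]
    rw [hfilter_map, hnil] at this
    exact absurd this (List.not_mem_nil)
  obtain ⟨q, qs, hqqs⟩ := List.exists_cons_of_ne_nil hne
  -- A's collected value list is the snds of ps
  have hvals : r.foldl
      (fun acc i => if (decide (0 < getD i) && !(v.contains i)) = true
        then acc ++ [getD i] else acc) ([] : List Int)
      = ps.map Prod.snd := by
    rw [PySem.List.foldl_append_if c getD r []]
    simp only [List.nil_append, hps, List.map_map]
    rfl
  have hvals' : ps.map Prod.snd = q.2 :: qs.map Prod.snd := by rw [hqqs]; rfl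
  set M := List.foldl min q.2 (qs.map Prod.snd) with hMdef
  have hmin : PySem.List.min? (ps.map Prod.snd) (fun x => x) = some M := by
    rw [hvals']; exact PySem.List.min?_id_cons q.2 (qs.map Prod.snd)
  -- 0 < M
  have hMpos : 0 < M := by
    have hmem := PySem.List.min?_mem hmin
    rw [hps] at hmem
    obtain ⟨p, hp, hpeq⟩ := List.mem_map.mp hmem
    obtain ⟨i, hi, hieq⟩ := List.mem_map.mp hp
    have hci : c i = true := (List.mem_filter.mp hi).2
    have : 0 < getD i := by
      rw [Bool.and_eq_true] at hci
      simpa using hci.1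
    rw [← hpeq, ← hieq]
    exact this
  -- A reduces to a find? over r with the min value
  have hA : find_min_vertice v g
      = r.find? (fun i => !(v.contains i) && decide (getD i = M)) := by
    show (match PySem.List.min? (r.foldl _ []) (fun x => x) with
          | none => none
          | some min_val => r.find? (fun i => !(v.contains i) && decide (getD i = min_val))) = _
    rw [hvals, hmin]
  -- restrict the find? to the candidate sublist (M > 0 makes the filter harmless)
  have himp : ∀ i, (!(v.contains i) && decide (getD i = M)) = true → c i = true := by
    intro i hi
    rw [Bool.and_eq_true] at hi
    obtain ⟨h1, h2⟩ := hi
    have hgi : getD i = M := by simpa using h2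
    simp [hc, hgi, hMpos]
    simpa using h1
  have hAA : find_min_vertice v g
      = rc.find? (fun i => !(v.contains i) && decide (getD i = M)) := by
    rw [hA, pv_find?_filter_of_imp _ c himp r]
  -- move the find? through the map onto pairs
  have hmap : ps.find? (fun p => !(v.contains p.1) && decide (p.2 = M))
      = (rc.find? (fun i => !(v.contains i) && decide (getD i = M))).map f := by
    rw [hps, List.find?_map]
    rfl
  -- on elements of ps the contains test is always true
  have hcongr : ps.find? (fun p => !(v.contains p.1) && decide (p.2 = M))
      = ps.find? (fun p => decide (p.2 = M)) := by
    apply pv_find?_congr_mem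
    intro p hp
    rw [hps] at hp
    obtain ⟨i, hi, hieq⟩ := List.mem_map.mp hp
    have hci := (List.mem_filter.mp hi).2
    rw [Bool.and_eq_true] at hci
    have hnc : (!(v.contains i)) = true := hci.2
    rw [← hieq]
    show (!(v.contains i) && decide (getD i = M)) = decide (getD i = M)
    rw [hnc, Bool.true_and]
  -- B computes the running argmin of ps
  have hBval : find_min_vertice_alt v g = some (pvF q qs).1 := by
    rw [hB, hqqs, pv_foldl_none]
    rfl
  -- the argmin of ps is the first pair with the min value
  have hfind : ps.find? (fun p => decide (p.2 = M)) = some (pvF q qs) := by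
    rw [hqqs]; exact pv_F_find qs q
  -- assemble
  rw [hAA, hBval]
  have : (rc.find? (fun i => !(v.contains i) && decide (getD i = M))).map f = some (pvF q qs) := by
    rw [← hmap, hcongr, hfind]
  cases hfo : rc.find? (fun i => !(v.contains i) && decide (getD i = M)) with
  | none => rw [hfo] at this; simp at this
  | some i =>
    rw [hfo] at this
    simp only [Option.map_some] at this
    have h2 : f i = pvF q qs := Option.some.inj this
    have h3 : (pvF q qs).1 = i := by rw [← h2]
    rw [h3]

-- ===== VERDICT (by name: the statement is the Claim_ definition above) =====
theorem find_min_vertice_spec : Claim_equal_find_min_vertice := by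
  intro v g _ hpre
  exact find_min_vertice_eq v g hpre
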